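-- pv_equiv track=rewrite | github.com/James-Oswald/IEEE-Professional-Development-Night | 1-25-21/conCount.py | conCount
-- ===== SOURCE A (Python) =====
-- def conCount(items, key):
--     items = str(items)
--     key = str(key)
--     acc = 0
--     maxAcc = 0
--     for item in items:
--         if item == key:
--             acc += 1
--             if acc > maxAcc:
--                 maxAcc = acc
--         else:
--             acc = 0
--     return maxAcc
-- ===== SOURCE B (Python) =====
-- from itertools import groupby
--
-- def conCount(items, key):
--     items = str(items)
--     key = str(key)
--     return max((sum(1 for _ in g) for k, g in groupby(items) if k == key), default=0)
-- ===== Notes on version B (the rewrite author's own statement) =====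
-- stated objective: idiomatic
-- what changed: Replaces the per-character accumulator/branching loop with itertools.groupby: build maximal runs first, then take the max length of runs whose character equals key (default 0).
import Mathlib
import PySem

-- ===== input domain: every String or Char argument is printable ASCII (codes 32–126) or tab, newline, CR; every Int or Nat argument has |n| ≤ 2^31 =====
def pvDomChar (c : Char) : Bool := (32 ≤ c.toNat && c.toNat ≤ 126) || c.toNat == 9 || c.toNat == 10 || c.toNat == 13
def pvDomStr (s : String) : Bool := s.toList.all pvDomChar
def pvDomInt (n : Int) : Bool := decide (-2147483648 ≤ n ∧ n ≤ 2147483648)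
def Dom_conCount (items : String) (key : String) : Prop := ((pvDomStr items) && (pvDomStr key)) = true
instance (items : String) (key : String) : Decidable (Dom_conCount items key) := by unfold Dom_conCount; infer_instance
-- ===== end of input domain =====

-- B changes the decomposition (runs-then-max via groupby instead of a running accumulator); same cost, more idiomatic.

-- Python's `item == key` where item is the 1-char string of c: string equality, exact as char-list equality.
def pvIsKey (key : String) (c : Char) : Bool := key.toList == [c]

-- ===== PORT A =====
-- state (acc, maxAcc); one fold step per character, as in A's for-loop
def conCountStep (key : String) (s : Int × Int) (item : Char) : Int × Int :=
  if pvIsKey key item then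
    let acc := s.1 + 1
    (acc, if acc > s.2 then acc else s.2)
  else (0, s.2)

def conCount (items : String) (key : String) : Int :=
  (items.toList.foldl (conCountStep key) (0, 0)).2

-- ===== PORT B =====
-- itertools.groupby: maximal runs of identical characters, each with its length
def pvRuns : List Char → List (Char × Nat)
  | [] => []
  | c :: cs =>
    (c, (cs.takeWhile (· == c)).length + 1) :: pvRuns (cs.dropWhile (· == c))
termination_by l => l.length
decreasing_by
  simpa using Nat.lt_succ_of_le (List.length_dropWhile_le _ _)

-- max(gen, default=0): lengths of runs whose key matches, reduced by max from 0
def conCount_alt (items : String) (key : String) : Int :=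
  ((pvRuns items.toList).filterMap
      (fun p => if pvIsKey key p.1 then some ((p.2 : Int)) else none)).foldl max 0

-- ===== PRECONDITION & SPEC =====
def Spec_conCount (items : String) (key : String) (out : Int) : Prop := out = conCount_alt items key
instance (items : String) (key : String) (out : Int) : Decidable (Spec_conCount items key out) := by unfold Spec_conCount; infer_instance

-- ===== CLAIM (what is proved, stated in full; the proofs are below) =====
def Claim_equal_conCount : Prop := ∀ (items : String) (key : String), Dom_conCount items key → Spec_conCount items key (conCount items key)

-- ===== LEMMAS AND PROOFS =====

-- A's fold over a block of n copies of a matching character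
lemma foldl_replicate_match (key : String) (c : Char) (h : pvIsKey key c = true) :
    ∀ (n : Nat) (acc m : Int), acc ≤ m →
      (List.replicate n c).foldl (conCountStep key) (acc, m) = (acc + n, max m (acc + n)) := by
  intro n
  induction n with
  | zero => intro acc m hm; simp; omega
  | succ k ih =>
      intro acc m hm
      rw [List.replicate_succ, List.foldl_cons]
      simp only [conCountStep, h, if_true]
      have := ih (acc + 1) (if acc + 1 > m then acc + 1 else m) (by split <;> omega)
      rw [this, Prod.mk.injEq]
      push_cast
      refine ⟨by omega, by split <;> omega⟩

-- A's fold over a block of non-matching characters leaves (0, m)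
lemma foldl_replicate_nomatch (key : String) (c : Char) (h : pvIsKey key c = false) :
    ∀ (n : Nat) (acc m : Int),
      (List.replicate n c).foldl (conCountStep key) (acc, m) = (if n = 0 then acc else 0, m) := by
  intro n
  induction n with
  | zero => intro acc m; simp
  | succ k ih =>
      intro acc m
      rw [List.replicate_succ, List.foldl_cons]
      simp only [conCountStep, h, if_false, Bool.false_eq_true]
      rw [ih]
      split <;> simp

-- the accumulator can be reset before a list whose head does not match
lemma foldl_reset (key : String) (l : List Char) (acc m : Int)
    (h : ∀ d, l.head? = some d → pvIsKey key d = false) :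
    (l.foldl (conCountStep key) (acc, m)).2 = (l.foldl (conCountStep key) (0, m)).2 := by
  cases l with
  | nil => rfl
  | cons d ds =>
      have hd := h d rfl
      simp only [List.foldl_cons, conCountStep, hd, Bool.false_eq_true, if_false]

lemma isKey_unique (key : String) (c d : Char) (hc : pvIsKey key c = true) (hne : d ≠ c) :
    pvIsKey key d = false := by
  simp only [pvIsKey, beq_iff_eq] at hc ⊢
  simp [hc, hne.symm]

-- main invariant: A's fold from (0, m) equals B's max-fold seeded with m
lemma main_lemma (key : String) :
    ∀ (N : Nat) (l : List Char), l.length ≤ N → ∀ m : Int, 0 ≤ m →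
      (l.foldl (conCountStep key) (0, m)).2 =
      ((pvRuns l).filterMap
        (fun p => if pvIsKey key p.1 then some ((p.2 : Int)) else none)).foldl max m := by
  intro N
  induction N with
  | zero =>
      intro l hl m hm
      have : l = [] := List.eq_nil_of_length_eq_zero (Nat.le_zero.mp hl)
      subst this; simp [pvRuns]
  | succ N ih =>
      intro l hl m hm
      cases l with
      | nil => simp [pvRuns]
      | cons c cs =>
          have hsplit : cs = cs.takeWhile (· == c) ++ cs.dropWhile (· == c) :=
            (List.takeWhile_append_dropWhile).symm
          set run := cs.takeWhile (· == c) with hrun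
          set rest := cs.dropWhile (· == c) with hrest
          have hrepl : run = List.replicate run.length c := by
            rw [List.eq_replicate_iff]
            refine ⟨rfl, fun b hb => ?_⟩
            have := List.mem_takeWhile_imp hb
            simpa [beq_iff_eq] using this
          have hrestlen : rest.length ≤ N := by
            have h1 : rest.length ≤ cs.length := List.length_dropWhile_le _ _
            have h2 : cs.length + 1 ≤ N + 1 := by simpa using hl
            omega
          have hresthead : ∀ d, rest.head? = some d → (d == c) = false := by
            intro d hd
            have := List.head?_dropWhile_not (p := (· == c)) (l := cs)
            rw [← hrest, hd] at this
            simpa using this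
          have hccons : c :: cs = List.replicate (run.length + 1) c ++ rest := by
            conv_lhs => rw [hsplit, hrepl]
            simp [List.replicate_succ]
          have hpv : pvRuns (c :: cs) = (c, run.length + 1) :: pvRuns rest := by
            rw [pvRuns]
          by_cases hk : pvIsKey key c = true
          · -- matching run of length run.length + 1
            conv_lhs => rw [hccons]
            rw [List.foldl_append,
                foldl_replicate_match key c hk (run.length + 1) 0 m hm]
            have hreset : ∀ d, rest.head? = some d → pvIsKey key d = false := by
              intro d hd
              apply isKey_unique key c d hk
              have := hresthead d hd
              simpa using this
            rw [foldl_reset key rest _ _ hreset]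
            rw [ih rest hrestlen (max m (0 + (run.length + 1 : Nat)))
                  (le_trans hm (le_max_left _ _))]
            rw [hpv]
            simp [hk]
          · -- non-matching run: state returns to (0, m), run filtered out
            have hk' : pvIsKey key c = false := by simpa using hk
            conv_lhs => rw [hccons]
            rw [List.foldl_append,
                foldl_replicate_nomatch key c hk' (run.length + 1) 0 m]
            simp only [Nat.succ_ne_zero, if_false]
            rw [ih rest hrestlen m hm]
            rw [hpv]
            simp [hk']

-- ===== VERDICT (by name: the statement is the Claim_ definition above) =====
theorem conCount_spec : Claim_equal_conCount := by
  intro items key _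
  unfold Spec_conCount conCount conCount_alt
  exact main_lemma key items.toList.length items.toList le_rfl 0 le_rfl
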